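-- pv_equiv track=rewrite | github.com/ericjanto/ship-backend | WildcardSearch.py | get_all_dollar_terms
-- ===== SOURCE A (Python) =====
-- def get_all_dollar_terms(term):
--     answer = []
--     length = len(term)
--     for i in range(0, (length+1)):
--         if i == length:
--             left = ""
--         else:
--             left = term[i:]
--         if i == 0:
--             right = ""
--         else:
--             right = term[:i]
--
--         dollar_term = left + "$" + right
--
--         answer.append(dollar_term)
--
--     return answer
-- ===== SOURCE B (Python) =====
-- def get_all_dollar_terms(term):
--     # All outputs are cyclic rotations of term + "$": slice fixed-width
--     # windows out of a doubled buffer instead of concatenating two slices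
--     # and "$" per iteration.
--     s2 = (term + "$") * 2
--     L = len(term) + 1
--     return [s2[i:i + L] for i in range(L)]
-- ===== Notes on version B (the rewrite author's own statement) =====
-- stated objective: alternative
-- what changed: B precomputes the doubled buffer (term+'$')*2 once and emits each result as a single fixed-width slice s2[i:i+L], instead of A's per-iteration two-slice-plus-'$' concatenation with special cases for i==0 and i==length.
import Mathlib
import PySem

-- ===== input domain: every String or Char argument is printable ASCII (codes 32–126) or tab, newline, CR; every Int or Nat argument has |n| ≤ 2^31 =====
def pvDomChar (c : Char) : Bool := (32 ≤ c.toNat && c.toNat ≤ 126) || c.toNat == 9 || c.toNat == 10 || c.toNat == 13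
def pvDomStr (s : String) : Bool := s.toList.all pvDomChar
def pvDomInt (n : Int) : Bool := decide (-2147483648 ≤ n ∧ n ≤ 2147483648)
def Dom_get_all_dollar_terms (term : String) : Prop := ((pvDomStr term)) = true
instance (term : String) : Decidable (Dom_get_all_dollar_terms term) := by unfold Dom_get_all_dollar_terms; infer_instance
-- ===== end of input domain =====

-- B emits each rotation as one fixed-width window of a precomputed doubled buffer (term+'$')*2 instead of A's two-slice-and-'$' concatenation per index (objective: alternative).
-- ===== PORT A =====
def get_all_dollar_terms (term : String) : List String :=
  let t := term.toList
  let length : Int := t.length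
  (PySem.List.pyRange 0 (length + 1) 1).foldl (fun answer i =>
    let left : List Char := if i = length then [] else PySem.List.slice t (some i) none
    let right : List Char := if i = 0 then [] else PySem.List.slice t none (some i)
    let dollar_term := left ++ '$' :: right
    answer ++ [String.ofList dollar_term]) []

-- ===== PORT B =====
def get_all_dollar_terms_alt (term : String) : List String :=
  let s2 := PySem.List.pyRepeat (term.toList ++ ['$']) 2
  let L : Int := term.toList.length + 1
  (PySem.List.pyRange 0 L 1).map (fun i =>
    String.ofList (PySem.List.slice s2 (some i) (some (i + L))))

-- ===== PRECONDITION & SPEC =====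
def Spec_get_all_dollar_terms (term : String) (out : List String) : Prop := out = get_all_dollar_terms_alt term
instance (term : String) (out : List String) : Decidable (Spec_get_all_dollar_terms term out) := by unfold Spec_get_all_dollar_terms; infer_instance

-- ===== CLAIM (what is proved, stated in full; the proofs are below) =====
def Claim_equal_get_all_dollar_terms : Prop := ∀ (term : String), Dom_get_all_dollar_terms term → Spec_get_all_dollar_terms term (get_all_dollar_terms term)

-- ===== LEMMAS AND PROOFS =====

-- the window s2[k : k+L] of the doubled buffer equals A's rotation drop k ++ '$' :: take k
theorem pv_window_eq (t : List Char) (k : Nat) (hk : k ≤ t.length) :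
    PySem.List.slice (PySem.List.pyRepeat (t ++ ['$']) 2) (some (k : Int))
      (some ((k : Int) + ((t.length : Int) + 1)))
      = t.drop k ++ '$' :: t.take k := by
  have hrep : PySem.List.pyRepeat (t ++ ['$']) 2 = (t ++ ['$']) ++ (t ++ ['$']) := by
    simp [PySem.List.pyRepeat]
  have h1 : ((k : Int) + ((t.length : Int) + 1)) = ((k : Int) + ((t.length + 1 : Nat) : Int)) := by
    push_cast; ring
  rw [hrep, h1, PySem.List.slice_natCast_add]
  have hdrop : ((t ++ ['$']) ++ (t ++ ['$'])).drop k = (t ++ ['$']).drop k ++ (t ++ ['$']) := by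
    rw [List.drop_append_of_le_length (by simp; omega)]
  rw [hdrop]
  have hlen : ((t ++ ['$']).drop k).length = t.length + 1 - k := by simp
  rw [List.take_append, hlen]
  have h2 : t.length + 1 - (t.length + 1 - k) = k := by omega
  rw [List.take_of_length_le (by omega), h2]
  rw [List.drop_append_of_le_length hk, List.take_append_of_le_length hk]
  simp

-- ===== VERDICT (by name: the statement is the Claim_ definition above) =====
theorem get_all_dollar_terms_spec : Claim_equal_get_all_dollar_terms := by
  intro term _
  unfold Spec_get_all_dollar_terms get_all_dollar_terms get_all_dollar_terms_alt
  simp only []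
  set t := term.toList with ht
  rw [PySem.List.foldl_append_singleton_eq_map]
  refine (List.nil_append _).trans (List.map_congr_left ?_)
  intro i hi
  rw [PySem.List.mem_pyRange_one] at hi
  obtain ⟨h0, h1⟩ := hi
  obtain ⟨k, rfl⟩ := Int.eq_ofNat_of_zero_le h0
  have hk : k ≤ t.length := by omega
  congr 1
  rw [pv_window_eq t k hk]
  by_cases hkl : k = t.length
  · subst hkl
    simp [PySem.List.slice_to_natCast]
  · have : ¬ ((k : Int) = (t.length : Int)) := by exact_mod_cast hkl
    simp only [if_neg this]
    by_cases hk0 : k = 0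
    · subst hk0
      simp
    · have : ¬ ((k : Int) = 0) := by exact_mod_cast hk0
      simp only [if_neg this]
      rw [PySem.List.slice_from_natCast, PySem.List.slice_to_natCast]
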